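-- pv_equiv track=rewrite | github.com/xlax007/Collection-of-Algorithms | Sudoku_Alt.py | get_zones
-- ===== SOURCE A (Python) =====
-- def get_zones(matrixAux):
--     matrix = matrixAux.copy()
--     zones = [[] for i in range(9)]
--     zone = j = i = 0
--     while len(matrix) != 0:
--         zones[zone].append(matrix[i][j])
--         j += 1
--         if j % 3 == 0:
--             j -= 3
--             i += 1
--         if i == 3:
--             i = 0
--             j += 3
--             zone += 1
--         if i == 0 and j == len(matrix[0]):
--             matrix.pop(0)
--             matrix.pop(0)
--             matrix.pop(0)
--             i = 0
--             j = 0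
--     return zones
-- ===== SOURCE B (Python) =====
-- def get_zones(matrixAux):
--     """Collect the 3x3 zones of a sudoku grid, one band of three rows at a
--     time.  The top row of each band drives the scan: each of its cells goes
--     to the zone its column falls in, and every cell that completes a
--     3-column block pulls in the matching 3-cell slices of the two rows
--     below it."""
--     zones = [[] for _ in range(9)]
--     z = 0
--     for top in range(0, len(matrixAux), 3):
--         row, mid, low = matrixAux[top], matrixAux[top + 1], matrixAux[top + 2]
--         for j in range(len(row)):
--             zones[z + j // 3].append(row[j])
--             if j % 3 == 2:
--                 zones[z + j // 3] += mid[j - 2:j + 1]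
--                 zones[z + j // 3] += low[j - 2:j + 1]
--         z += len(row) // 3
--     return zones
-- ===== Notes on version B (the rewrite author's own statement) =====
-- stated objective: simpler
-- what changed: Replaces A's destructive pointer state machine (a while loop juggling i/j/zone counters, re-checking widths and popping processed rows off a copy) with one forward pass in which the top row of each 3-row band drives the scan: each top-row cell goes to zone z + j//3 and every cell completing a 3-column block pulls in the matching slices of the two rows below.
import Mathlib
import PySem

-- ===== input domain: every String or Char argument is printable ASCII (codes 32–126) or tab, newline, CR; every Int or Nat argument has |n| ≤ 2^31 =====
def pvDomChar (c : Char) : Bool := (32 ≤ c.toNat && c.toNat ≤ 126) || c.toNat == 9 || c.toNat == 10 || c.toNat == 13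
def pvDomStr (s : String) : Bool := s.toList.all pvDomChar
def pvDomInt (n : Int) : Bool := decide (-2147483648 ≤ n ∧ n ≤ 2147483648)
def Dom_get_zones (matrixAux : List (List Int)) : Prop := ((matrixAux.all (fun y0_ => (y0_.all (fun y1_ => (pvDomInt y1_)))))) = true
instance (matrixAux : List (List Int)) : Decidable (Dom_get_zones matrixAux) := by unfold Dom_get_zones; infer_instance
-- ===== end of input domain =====

-- B replaces A's destructive cell-pointer state machine (i/j/zone counters, rows
-- popped off a copy) by one forward pass: the top row of each 3-row band drives
-- the scan, and each completed 3-column block pulls in the two rows below (simpler).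
-- A copies its argument and pops rows off the copy; neither version mutates the input.


-- ===== PORT A =====
-- the while loop, step for step; fuel = one unit per executed iteration (each
-- iteration appends exactly one cell, so 'total number of cells + 1' units are
-- enough on every input Pre_ admits; the 0-fuel branch is never reached there).
-- Where Python raises (matrix[i][j] / row[j] / zones[zone] out of range, pop on
-- a short list) the port returns the zones built so far — all outside Pre_.
def loopA : Nat → List (List Int) → List (List Int) → Int → Int → Int → List (List Int)
  | 0, _, zones, _, _, _ => zones
  | fuel+1, matrix, zones, zone, i, j =>
    if matrix.length = 0 then zones
    else
      match PySem.List.pyGet? matrix i with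
      | none => zones
      | some row =>
        match PySem.List.pyGet? row j with
        | none => zones
        | some v =>
          -- zones[zone].append(matrix[i][j])
          let zones' := PySem.List.pySetD zones zone (PySem.List.pyGetD zones zone [] ++ [v])
          let j1 := j + 1
          let ij := if PySem.Int.mod j1 3 = 0 then (i + 1, j1 - 3) else (i, j1)
          let ijz := if ij.1 = 3 then ((0:Int), ij.2 + 3, zone + 1) else (ij.1, ij.2, zone)
          if ijz.1 = 0 ∧ ijz.2.1 = PySem.List.len (matrix.headD []) then
            loopA fuel (matrix.drop 3) zones' ijz.2.2 0 0
          else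
            loopA fuel matrix zones' ijz.2.2 ijz.1 ijz.2.1

def get_zones (matrixAux : List (List Int)) : List (List Int) :=
  loopA (matrixAux.foldl (fun a r => a + r.length) 0 + 1)
    matrixAux (List.replicate 9 []) 0 0 0

-- ===== PORT B =====
-- transliteration of Source B: for each band start 'top', bind the band's three
-- rows, walk the top row; each cell goes to zone z + j//3, and a cell with
-- j % 3 == 2 also appends the matching 3-cell slices of the two rows below.
-- Where Python raises (matrixAux[top+k] / zones[...] out of range) the port
-- reads a default / leaves zones unchanged — all outside Pre_.
def get_zones_alt (matrixAux : List (List Int)) : List (List Int) :=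
  (((PySem.List.pyRange 0 (PySem.List.len matrixAux) 3).foldl
    (fun (st : List (List Int) × Int) top =>
      let row := PySem.List.pyGetD matrixAux top []
      let mid := PySem.List.pyGetD matrixAux (top+1) []
      let low := PySem.List.pyGetD matrixAux (top+2) []
      let zs := (PySem.List.pyRange 0 (PySem.List.len row) 1).foldl
        (fun zs j =>
          let k := st.2 + PySem.Int.floordiv j 3
          let zs := PySem.List.pySetD zs k
            (PySem.List.pyGetD zs k [] ++ [PySem.List.pyGetD row j 0])
          if PySem.Int.mod j 3 = 2 then
            let zs := PySem.List.pySetD zs k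
              (PySem.List.pyGetD zs k [] ++ PySem.List.slice mid (some (j-2)) (some (j+1)))
            PySem.List.pySetD zs k
              (PySem.List.pyGetD zs k [] ++ PySem.List.slice low (some (j-2)) (some (j+1)))
          else zs) st.1
      (zs, st.2 + PySem.Int.floordiv (PySem.List.len row) 3))
    (List.replicate 9 [], 0))).1

-- ===== PRECONDITION & SPEC =====
-- Exactly the inputs on which the Python A returns (on every other input it
-- raises IndexError): the rows split into complete bands of three; in each band
-- the first row is non-empty and fixes the band's width, the other two rows
-- reach at least to the end of its last complete 3-column block, and the
-- running zone counter never leaves 0..8.  A condition on row lengths only.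
def bandsOK : Nat → List (List Int) → Bool
  | _, [] => true
  | z, r0 :: r1 :: r2 :: rest =>
      decide (0 < r0.length) &&
      decide (3 * (r0.length / 3) ≤ r1.length) &&
      decide (3 * (r0.length / 3) ≤ r2.length) &&
      (if r0.length % 3 = 0 then decide (z + r0.length / 3 ≤ 9)
       else decide (z + r0.length / 3 + 1 ≤ 9)) &&
      bandsOK (z + r0.length / 3) rest
  | _, _ => false

def Pre_get_zones (matrixAux : List (List Int)) : Prop := bandsOK 0 matrixAux = true
instance (matrixAux : List (List Int)) : Decidable (Pre_get_zones matrixAux) := by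
  unfold Pre_get_zones; infer_instance

def pvWitness_get_zones : List (List Int) :=
  [[5,3,4,6,7,8,9,1,2],[6,7,2,1,9,5,3,4,8],[1,9,8,3,4,2,5,6,7],
   [8,5,9,7,6,1,4,2,3],[4,2,6,8,5,3,7,9,1],[7,1,3,9,2,4,8,5,6],
   [9,6,1,5,3,7,2,8,4],[2,8,7,4,1,9,6,3,5],[3,4,5,2,8,6,1,7,9]]

def Spec_get_zones (matrixAux : List (List Int)) (out : List (List Int)) : Prop := out = get_zones_alt matrixAux
instance (matrixAux : List (List Int)) (out : List (List Int)) : Decidable (Spec_get_zones matrixAux out) := by unfold Spec_get_zones; infer_instance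

-- ===== CLAIM (what is proved, stated in full; the proofs are below) =====
def Claim_equal_get_zones : Prop := ∀ (matrixAux : List (List Int)), Dom_get_zones matrixAux → Pre_get_zones matrixAux → Spec_get_zones matrixAux (get_zones matrixAux)

-- ===== LEMMAS AND PROOFS =====
def appAt (zs : List (List Int)) (k : Nat) (xs : List Int) : List (List Int) :=
  zs.set k (zs.getD k [] ++ xs)

lemma pyget_nat (l : List Int) (n : Nat) (h : n < l.length) :
    PySem.List.pyGet? l (n : Int) = some (l.getD n 0) := by
  rw [PySem.List.pyGet?_natCast, List.getElem?_eq_getElem h, List.getD_eq_getElem l 0 h]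

lemma stepK1 (f : Nat) (r0 r1 r2 row : List Int) (rest zs : List (List Int)) (z ii n : Nat)
    (hfetch : PySem.List.pyGet? (r0::r1::r2::rest) (ii : Int) = some row)
    (hii : ii < 3) (hrow : n < row.length) (hmod : (n+1) % 3 ≠ 0) :
    loopA (f+1) (r0::r1::r2::rest) zs (z : Int) (ii : Int) (n : Int) =
      (if ii = 0 ∧ n+1 = r0.length then
        loopA f rest (appAt zs z [row.getD n 0]) (z : Int) ((0:Nat) : Int) ((0:Nat) : Int)
      else
        loopA f (r0::r1::r2::rest) (appAt zs z [row.getD n 0]) (z : Int) (ii : Int) ((n+1 : Nat) : Int)) := by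
  simp only [loopA]
  rw [if_neg (by simp)]
  rw [hfetch]
  dsimp only
  rw [pyget_nat row n hrow]
  dsimp only
  have e1 : ((n : Int) + 1) = ((n+1 : Nat) : Int) := by push_cast; ring
  rw [e1]
  rw [if_neg (show ¬ PySem.Int.mod ((n+1 : Nat) : Int) 3 = 0 by
        rw [PySem.Int.mod_eq_emod_of_pos (by norm_num)]; omega)]
  dsimp only
  rw [if_neg (show ¬ ((ii : Int) = 3) by exact_mod_cast (by omega : ¬ (ii = 3)))]
  dsimp only
  simp only [List.headD_cons, PySem.List.len_eq]
  by_cases hc : ii = 0 ∧ n+1 = r0.length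
  · rw [if_pos (by exact_mod_cast hc)]
    rw [if_pos hc]
    simp [appAt]
  · rw [if_neg (by push_cast; exact_mod_cast hc)]
    rw [if_neg hc]
    simp [appAt]

lemma stepK2 (f : Nat) (r0 r1 r2 row : List Int) (rest zs : List (List Int)) (z ii n : Nat)
    (hfetch : PySem.List.pyGet? (r0::r1::r2::rest) (ii : Int) = some row)
    (hii : ii < 2) (hrow : n < row.length) (hmod : (n+1) % 3 = 0) :
    loopA (f+1) (r0::r1::r2::rest) zs (z : Int) (ii : Int) (n : Int) =
      loopA f (r0::r1::r2::rest) (appAt zs z [row.getD n 0]) (z : Int) ((ii+1 : Nat) : Int) ((n-2 : Nat) : Int) := by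
  simp only [loopA]
  rw [if_neg (by simp)]
  rw [hfetch]; dsimp only
  rw [pyget_nat row n hrow]; dsimp only
  have e1 : ((n : Int) + 1) = ((n+1 : Nat) : Int) := by push_cast; ring
  rw [e1]
  rw [if_pos (show PySem.Int.mod ((n+1 : Nat) : Int) 3 = 0 by
        rw [PySem.Int.mod_eq_emod_of_pos (by norm_num)]; omega)]
  dsimp only
  rw [if_neg (show ¬ ((ii : Int) + 1 = 3) by omega)]
  dsimp only
  rw [if_neg (show ¬ ((ii : Int) + 1 = 0 ∧ ((n+1:Nat) : Int) - 3 = PySem.List.len ((r0::r1::r2::rest).headD [])) by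
        rintro ⟨h, -⟩; omega)]
  have e2 : ((n+1 : Nat) : Int) - 3 = ((n-2 : Nat) : Int) := by push_cast; omega
  have e3 : ((ii : Int) + 1) = ((ii+1 : Nat) : Int) := by omega
  rw [e2, e3]
  simp [appAt]

lemma stepK3 (f : Nat) (r0 r1 r2 : List Int) (rest zs : List (List Int)) (z n : Nat)
    (hrow : n < r2.length) (hmod : (n+1) % 3 = 0) :
    loopA (f+1) (r0::r1::r2::rest) zs (z : Int) ((2:Nat) : Int) (n : Int) =
      (if n+1 = r0.length then
        loopA f rest (appAt zs z [r2.getD n 0]) ((z+1 : Nat) : Int) ((0:Nat) : Int) ((0:Nat) : Int)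
      else
        loopA f (r0::r1::r2::rest) (appAt zs z [r2.getD n 0]) ((z+1 : Nat) : Int) ((0:Nat) : Int) ((n+1 : Nat) : Int)) := by
  simp only [loopA]
  rw [if_neg (by simp)]
  rw [show PySem.List.pyGet? (r0::r1::r2::rest) (((2:Nat)) : Int) = some r2 by
        rw [PySem.List.pyGet?_natCast]; rfl]
  dsimp only
  rw [pyget_nat r2 n hrow]; dsimp only
  have e1 : ((n : Int) + 1) = ((n+1 : Nat) : Int) := by push_cast; ring
  rw [e1]
  rw [if_pos (show PySem.Int.mod ((n+1 : Nat) : Int) 3 = 0 by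
        rw [PySem.Int.mod_eq_emod_of_pos (by norm_num)]; omega)]
  dsimp only
  rw [if_pos (show ((2:Nat) : Int) + 1 = 3 by norm_num)]
  dsimp only
  simp only [List.headD_cons, PySem.List.len_eq]
  have e2 : ((n+1 : Nat) : Int) - 3 + 3 = ((n+1 : Nat) : Int) := by ring
  rw [e2]
  have e3 : ((z : Int) + 1) = ((z+1 : Nat) : Int) := by push_cast; ring
  by_cases hc : n+1 = r0.length
  · rw [if_pos (by exact ⟨trivial, by exact_mod_cast congrArg (Nat.cast : Nat → Int) hc⟩)]
    rw [if_pos hc, e3]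
    simp [appAt]
  · rw [if_neg (by rintro ⟨-, h⟩; exact hc (by exact_mod_cast h))]
    rw [if_neg hc, e3]
    simp [appAt]

lemma appAt_appAt (zs : List (List Int)) (k : Nat) (xs ys : List Int) :
    appAt (appAt zs k xs) k ys = appAt zs k (xs ++ ys) := by
  unfold appAt
  by_cases h : k < zs.length
  · have e : (zs.set k (zs.getD k [] ++ xs)).getD k [] = zs.getD k [] ++ xs := by
      rw [List.getD_eq_getElem _ _ (by simpa using h)]
      exact List.getElem_set_self _
    rw [e, List.set_set, List.append_assoc]
  · have hk : zs.length ≤ k := Nat.not_lt.mp h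
    simp [List.set_eq_of_length_le hk]

lemma fetch0 (r0 r1 r2 : List Int) (rest : List (List Int)) :
    PySem.List.pyGet? (r0::r1::r2::rest) (((0:Nat)) : Int) = some r0 := by
  rw [PySem.List.pyGet?_natCast]; rfl
lemma fetch1 (r0 r1 r2 : List Int) (rest : List (List Int)) :
    PySem.List.pyGet? (r0::r1::r2::rest) (((1:Nat)) : Int) = some r1 := by
  rw [PySem.List.pyGet?_natCast]; rfl
lemma fetch2 (r0 r1 r2 : List Int) (rest : List (List Int)) :
    PySem.List.pyGet? (r0::r1::r2::rest) (((2:Nat)) : Int) = some r2 := by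
  rw [PySem.List.pyGet?_natCast]; rfl

lemma blockA (f : Nat) (r0 r1 r2 : List Int) (rest zs : List (List Int)) (z t : Nat)
    (h0 : 3*t+3 ≤ r0.length) (h1 : 3*t+3 ≤ r1.length) (h2 : 3*t+3 ≤ r2.length) :
    loopA (f+9) (r0::r1::r2::rest) zs (z : Int) ((0:Nat) : Int) ((3*t : Nat) : Int) =
      (if 3*t+3 = r0.length then
        loopA f rest (appAt zs z
          [r0.getD (3*t) 0, r0.getD (3*t+1) 0, r0.getD (3*t+2) 0,
           r1.getD (3*t) 0, r1.getD (3*t+1) 0, r1.getD (3*t+2) 0,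
           r2.getD (3*t) 0, r2.getD (3*t+1) 0, r2.getD (3*t+2) 0]) ((z+1 : Nat) : Int) ((0:Nat) : Int) ((0:Nat) : Int)
      else
        loopA f (r0::r1::r2::rest) (appAt zs z
          [r0.getD (3*t) 0, r0.getD (3*t+1) 0, r0.getD (3*t+2) 0,
           r1.getD (3*t) 0, r1.getD (3*t+1) 0, r1.getD (3*t+2) 0,
           r2.getD (3*t) 0, r2.getD (3*t+1) 0, r2.getD (3*t+2) 0]) ((z+1 : Nat) : Int) ((0:Nat) : Int) ((3*t+3 : Nat) : Int)) := by
  rw [show f+9 = f+8+1 from rfl,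
      stepK1 (f+8) r0 r1 r2 r0 rest zs z 0 (3*t) (fetch0 _ _ _ _) (by omega) (by omega) (by omega)]
  rw [if_neg (by omega)]
  rw [show f+8 = f+7+1 from rfl,
      stepK1 (f+7) r0 r1 r2 r0 rest _ z 0 (3*t+1) (fetch0 _ _ _ _) (by omega) (by omega) (by omega)]
  rw [if_neg (by omega)]
  rw [show f+7 = f+6+1 from rfl,
      stepK2 (f+6) r0 r1 r2 r0 rest _ z 0 (3*t+1+1) (fetch0 _ _ _ _) (by omega) (by omega) (by omega)]
  rw [show (3*t+1+1-2 : Nat) = 3*t from by omega, show ((0:Nat)+1 : Nat) = 1 from rfl]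
  rw [show f+6 = f+5+1 from rfl,
      stepK1 (f+5) r0 r1 r2 r1 rest _ z 1 (3*t) (fetch1 _ _ _ _) (by omega) (by omega) (by omega)]
  rw [if_neg (by omega)]
  rw [show f+5 = f+4+1 from rfl,
      stepK1 (f+4) r0 r1 r2 r1 rest _ z 1 (3*t+1) (fetch1 _ _ _ _) (by omega) (by omega) (by omega)]
  rw [if_neg (by omega)]
  rw [show f+4 = f+3+1 from rfl,
      stepK2 (f+3) r0 r1 r2 r1 rest _ z 1 (3*t+1+1) (fetch1 _ _ _ _) (by omega) (by omega) (by omega)]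
  rw [show (3*t+1+1-2 : Nat) = 3*t from by omega, show ((1:Nat)+1 : Nat) = 2 from rfl]
  rw [show f+3 = f+2+1 from rfl,
      stepK1 (f+2) r0 r1 r2 r2 rest _ z 2 (3*t) (fetch2 _ _ _ _) (by omega) (by omega) (by omega)]
  rw [if_neg (by omega)]
  rw [show f+2 = f+1+1 from rfl,
      stepK1 (f+1) r0 r1 r2 r2 rest _ z 2 (3*t+1) (fetch2 _ _ _ _) (by omega) (by omega) (by omega)]
  rw [if_neg (by omega)]
  rw [stepK3 f r0 r1 r2 rest _ z (3*t+1+1) (by omega) (by omega)]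
  rw [show (3*t+1+1+1 : Nat) = 3*t+3 from by omega]
  simp only [appAt_appAt, List.cons_append, List.nil_append,
    show (3*t+1+1 : Nat) = 3*t+2 from by omega]

-- values appended by the trailing partial block, as drop/take facts
lemma take3_drop (l : List Int) (n : Nat) (h : n+3 ≤ l.length) :
    (l.drop n).take 3 = [l.getD n 0, l.getD (n+1) 0, l.getD (n+2) 0] := by
  have h0 : n < l.length := by omega
  have h1 : n+1 < l.length := by omega
  have h2 : n+2 < l.length := by omega
  rw [List.drop_eq_getElem_cons h0, List.drop_eq_getElem_cons h1, List.drop_eq_getElem_cons h2,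
      List.getD_eq_getElem _ _ h0, List.getD_eq_getElem _ _ h1, List.getD_eq_getElem _ _ h2]
  rfl

lemma drop_part1 (l : List Int) (n : Nat) (h : l.length = n+1) :
    l.drop n = [l.getD n 0] := by
  have hn : n < l.length := by omega
  rw [List.drop_eq_getElem_cons hn, List.drop_eq_nil_of_le (by omega),
      List.getD_eq_getElem _ _ hn]

lemma drop_part2 (l : List Int) (n : Nat) (h : l.length = n+2) :
    l.drop n = [l.getD n 0, l.getD (n+1) 0] := by
  have hn : n < l.length := by omega
  have hn1 : n+1 < l.length := by omega
  rw [List.drop_eq_getElem_cons hn, List.drop_eq_getElem_cons hn1,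
      List.drop_eq_nil_of_le (by omega),
      List.getD_eq_getElem _ _ hn, List.getD_eq_getElem _ _ hn1]

def blocksFrom (r0 r1 r2 : List Int) (z : Nat) : Nat → Nat → List (List Int) → List (List Int)
  | _, 0, zs => zs
  | t, d+1, zs => blocksFrom r0 r1 r2 z (t+1) d
      (appAt zs (z+t) ((r0.drop (3*t)).take 3 ++ ((r1.drop (3*t)).take 3 ++ (r2.drop (3*t)).take 3)))

def bandApp (z : Nat) (r0 r1 r2 : List Int) (zs : List (List Int)) : List (List Int) :=
  let w := blocksFrom r0 r1 r2 z 0 (r0.length / 3) zs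
  if r0.length % 3 = 0 then w else appAt w (z + r0.length / 3) (r0.drop (3*(r0.length / 3)))

def bandsB : List (List Int) → Nat → List (List Int) → List (List Int)
  | r0 :: r1 :: r2 :: rest, z, zs => bandsB rest (z + r0.length/3) (bandApp z r0 r1 r2 zs)
  | _, _, zs => zs

lemma loopA_nil (f : Nat) (zs : List (List Int)) (zi i j : Int) :
    loopA f [] zs zi i j = zs := by cases f <;> simp [loopA]

lemma bandS (r0 r1 r2 : List Int) (rest : List (List Int)) (z : Nat)
    (h1 : 3*(r0.length/3) ≤ r1.length) (h2 : 3*(r0.length/3) ≤ r2.length)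
    (hs : r0.length % 3 ≠ 0) :
    ∀ d t zs f, t + d = r0.length/3 →
    loopA (9*d + r0.length % 3 + f) (r0::r1::r2::rest) zs ((z+t : Nat) : Int) ((0:Nat):Int) ((3*t : Nat):Int)
      = loopA f rest (appAt (blocksFrom r0 r1 r2 z t d zs) (z + r0.length/3) (r0.drop (3*(r0.length/3))))
          ((z + r0.length/3 : Nat) : Int) ((0:Nat):Int) ((0:Nat):Int) := by
  intro d
  induction d with
  | zero =>
    intro t zs f ht
    have hq : t = r0.length/3 := by omega
    have hcase : r0.length % 3 = 1 ∨ r0.length % 3 = 2 := by omega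
    rcases hcase with hsv | hsv
    · have hlen : r0.length = 3*t + 1 := by omega
      rw [hsv, show 9*0+1+f = f+1 from by omega]
      rw [stepK1 f r0 r1 r2 r0 rest zs (z+t) 0 (3*t) (fetch0 _ _ _ _) (by omega) (by omega) (by omega)]
      rw [if_pos ⟨rfl, by omega⟩]
      rw [drop_part1 r0 (3*(r0.length/3)) (by omega)]
      rw [show blocksFrom r0 r1 r2 z t 0 zs = zs from rfl, hq]
    · have hlen : r0.length = 3*t + 2 := by omega
      rw [hsv, show 9*0+2+f = f+1+1 from by omega]
      rw [stepK1 (f+1) r0 r1 r2 r0 rest zs (z+t) 0 (3*t) (fetch0 _ _ _ _) (by omega) (by omega) (by omega)]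
      rw [if_neg (by omega)]
      rw [stepK1 f r0 r1 r2 r0 rest _ (z+t) 0 (3*t+1) (fetch0 _ _ _ _) (by omega) (by omega) (by omega)]
      rw [if_pos ⟨rfl, by omega⟩]
      rw [appAt_appAt]
      rw [drop_part2 r0 (3*(r0.length/3)) (by omega)]
      rw [show blocksFrom r0 r1 r2 z t 0 zs = zs from rfl, hq]
      rfl
  | succ d ih =>
    intro t zs f ht
    rw [show 9*(d+1) + r0.length%3 + f = (9*d + r0.length%3 + f) + 9 from by omega]
    rw [blockA (9*d + r0.length%3 + f) r0 r1 r2 rest zs (z+t) t (by omega) (by omega) (by omega)]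
    rw [if_neg (by omega)]
    rw [show (z+t+1 : Nat) = z+(t+1) from by omega, show (3*t+3 : Nat) = 3*(t+1) from by omega]
    rw [ih (t+1) _ f (by omega)]
    congr 2
    show blocksFrom r0 r1 r2 z (t+1) d _ = blocksFrom r0 r1 r2 z t (d+1) zs
    rw [show blocksFrom r0 r1 r2 z t (d+1) zs
          = blocksFrom r0 r1 r2 z (t+1) d
              (appAt zs (z+t) ((r0.drop (3*t)).take 3 ++ ((r1.drop (3*t)).take 3 ++ (r2.drop (3*t)).take 3))) from rfl]
    rw [take3_drop r0 (3*t) (by omega), take3_drop r1 (3*t) (by omega), take3_drop r2 (3*t) (by omega)]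
    rfl

lemma band0 (r0 r1 r2 : List Int) (rest : List (List Int)) (z : Nat)
    (h1 : 3*(r0.length/3) ≤ r1.length) (h2 : 3*(r0.length/3) ≤ r2.length)
    (hs : r0.length % 3 = 0) :
    ∀ d t zs f, 1 ≤ d → t + d = r0.length/3 →
    loopA (9*d + f) (r0::r1::r2::rest) zs ((z+t : Nat) : Int) ((0:Nat):Int) ((3*t : Nat):Int)
      = loopA f rest (blocksFrom r0 r1 r2 z t d zs)
          ((z + r0.length/3 : Nat) : Int) ((0:Nat):Int) ((0:Nat):Int) := by
  intro d
  induction d with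
  | zero => intro t zs f hd ht; omega
  | succ d ih =>
    intro t zs f hd ht
    rcases Nat.eq_zero_or_pos d with hd0 | hdpos
    · subst hd0
      have hlen : r0.length = 3*t + 3 := by omega
      rw [show 9*1 + f = f+9 from by omega]
      rw [blockA f r0 r1 r2 rest zs (z+t) t (by omega) (by omega) (by omega)]
      rw [if_pos (by omega)]
      rw [show (z+t+1 : Nat) = z + r0.length/3 from by omega]
      congr 2
      rw [take3_drop r0 (3*t) (by omega), take3_drop r1 (3*t) (by omega), take3_drop r2 (3*t) (by omega)]
      rfl
    · rw [show 9*(d+1) + f = (9*d + f) + 9 from by omega]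
      rw [blockA (9*d + f) r0 r1 r2 rest zs (z+t) t (by omega) (by omega) (by omega)]
      rw [if_neg (by omega)]
      rw [show (z+t+1 : Nat) = z+(t+1) from by omega, show (3*t+3 : Nat) = 3*(t+1) from by omega]
      rw [ih (t+1) _ f hdpos (by omega)]
      conv_rhs => rw [blocksFrom]
      rw [take3_drop r0 (3*t) (by omega), take3_drop r1 (3*t) (by omega), take3_drop r2 (3*t) (by omega)]
      rfl

lemma bandFull (r0 r1 r2 : List Int) (rest zs : List (List Int)) (z : Nat) (f : Nat)
    (hw : 0 < r0.length)
    (h1 : 3*(r0.length/3) ≤ r1.length) (h2 : 3*(r0.length/3) ≤ r2.length) :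
    loopA (9*(r0.length/3) + r0.length % 3 + f) (r0::r1::r2::rest) zs ((z : Nat) : Int) ((0:Nat):Int) ((0:Nat):Int)
      = loopA f rest (bandApp z r0 r1 r2 zs) ((z + r0.length/3 : Nat) : Int) ((0:Nat):Int) ((0:Nat):Int) := by
  by_cases hs : r0.length % 3 = 0
  · have hq : 1 ≤ r0.length/3 := by omega
    rw [hs, show 9*(r0.length/3) + 0 + f = 9*(r0.length/3) + f from by omega]
    have := band0 r0 r1 r2 rest z h1 h2 hs (r0.length/3) 0 zs f hq (by omega)
    rw [show (z+0 : Nat) = z from by omega, show (3*0 : Nat) = 0 from rfl] at this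
    rw [this]
    unfold bandApp
    rw [if_pos hs]
  · have := bandS r0 r1 r2 rest z h1 h2 hs (r0.length/3) 0 zs f (by omega)
    rw [show (z+0 : Nat) = z from by omega, show (3*0 : Nat) = 0 from rfl] at this
    rw [this]
    unfold bandApp
    rw [if_neg hs]

def needFuel : List (List Int) → Nat
  | r0 :: _ :: _ :: rest => 9*(r0.length/3) + r0.length % 3 + needFuel rest
  | _ => 0

def qsum : List (List Int) → Nat
  | r0 :: _ :: _ :: rest => r0.length/3 + qsum rest
  | _ => 0

lemma mainAux : ∀ (k : Nat) (m : List (List Int)), m.length ≤ k →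
    ∀ (z : Nat) (zs : List (List Int)) (f : Nat), bandsOK z m = true →
    loopA (needFuel m + f) m zs ((z : Nat) : Int) ((0:Nat):Int) ((0:Nat):Int) = bandsB m z zs := by
  intro k
  induction k with
  | zero =>
    intro m hm z zs f _
    have : m = [] := List.eq_nil_of_length_eq_zero (by omega)
    subst this
    rw [loopA_nil]; rfl
  | succ k ih =>
    intro m hm z zs f hok
    rcases m with _ | ⟨r0, _ | ⟨r1, _ | ⟨r2, rest⟩⟩⟩
    · rw [loopA_nil]; rfl
    · simp [bandsOK] at hok
    · simp [bandsOK] at hok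
    · simp only [bandsOK, Bool.and_eq_true, decide_eq_true_eq] at hok
      obtain ⟨⟨⟨⟨hw, h1⟩, h2⟩, -⟩, hrest⟩ := hok
      rw [show needFuel (r0::r1::r2::rest) + f
            = 9*(r0.length/3) + r0.length % 3 + (needFuel rest + f) from by
            simp [needFuel]; omega]
      rw [bandFull r0 r1 r2 rest zs z (needFuel rest + f) hw h1 h2]
      rw [ih rest (by simp at hm; omega) (z + r0.length/3) _ f hrest]
      rfl

lemma needFuel_le : ∀ (k : Nat) (m : List (List Int)), m.length ≤ k → ∀ z, bandsOK z m = true →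
    needFuel m ≤ (m.map List.length).sum := by
  intro k
  induction k with
  | zero =>
    intro m hm z _
    have : m = [] := List.eq_nil_of_length_eq_zero (by omega)
    subst this; simp [needFuel]
  | succ k ih =>
    intro m hm z hok
    rcases m with _ | ⟨r0, _ | ⟨r1, _ | ⟨r2, rest⟩⟩⟩
    · simp [needFuel]
    · simp [bandsOK] at hok
    · simp [bandsOK] at hok
    · simp only [bandsOK, Bool.and_eq_true, decide_eq_true_eq] at hok
      obtain ⟨⟨⟨⟨hw, h1⟩, h2⟩, -⟩, hrest⟩ := hok
      have := ih rest (by simp at hm; omega) (z + r0.length/3) hrest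
      simp only [needFuel, List.map_cons, List.sum_cons]
      have hq : 3*(r0.length/3) + r0.length % 3 = r0.length := by omega
      omega

lemma bandsOK_mod : ∀ (k : Nat) (m : List (List Int)), m.length ≤ k → ∀ z, bandsOK z m = true →
    m.length % 3 = 0 := by
  intro k
  induction k with
  | zero =>
    intro m hm z _
    have : m = [] := List.eq_nil_of_length_eq_zero (by omega)
    subst this; simp
  | succ k ih =>
    intro m hm z hok
    rcases m with _ | ⟨r0, _ | ⟨r1, _ | ⟨r2, rest⟩⟩⟩
    · simp
    · simp [bandsOK] at hok
    · simp [bandsOK] at hok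
    · simp only [bandsOK, Bool.and_eq_true, decide_eq_true_eq] at hok
      obtain ⟨-, hrest⟩ := hok
      have := ih rest (by simp at hm; omega) (z + r0.length/3) hrest
      simp only [List.length_cons]
      omega

-- B's loops, named for the proofs: innerB is the body of the scan over the top
-- row, stepB the per-band step (the fold bodies of get_zones_alt).
def innerB (row mid low : List Int) (z : Int) (zs : List (List Int)) (j : Int) :
    List (List Int) :=
  let k := z + PySem.Int.floordiv j 3
  let zs := PySem.List.pySetD zs k
    (PySem.List.pyGetD zs k [] ++ [PySem.List.pyGetD row j 0])
  if PySem.Int.mod j 3 = 2 then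
    let zs := PySem.List.pySetD zs k
      (PySem.List.pyGetD zs k [] ++ PySem.List.slice mid (some (j-2)) (some (j+1)))
    PySem.List.pySetD zs k
      (PySem.List.pyGetD zs k [] ++ PySem.List.slice low (some (j-2)) (some (j+1)))
  else zs

def stepB (m : List (List Int)) (st : List (List Int) × Int) (top : Int) :
    List (List Int) × Int :=
  let row := PySem.List.pyGetD m top []
  let mid := PySem.List.pyGetD m (top+1) []
  let low := PySem.List.pyGetD m (top+2) []
  let zs := (PySem.List.pyRange 0 (PySem.List.len row) 1).foldl (innerB row mid low st.2) st.1
  (zs, st.2 + PySem.Int.floordiv (PySem.List.len row) 3)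

lemma alt_eq_stepB (m : List (List Int)) :
    get_zones_alt m
      = ((PySem.List.pyRange 0 (PySem.List.len m) 3).foldl (stepB m) (List.replicate 9 [], 0)).1 := rfl

lemma getD3 (r0 r1 r2 : List Int) (rest : List (List Int)) (n : Nat) :
    (r0::r1::r2::rest).getD (n+3) ([] : List Int) = rest.getD n [] := by
  rw [show n+3 = (n+2)+1 from rfl, List.getD_cons_succ,
      show n+2 = (n+1)+1 from rfl, List.getD_cons_succ, List.getD_cons_succ]

lemma stepB_shift (r0 r1 r2 : List Int) (rest : List (List Int))
    (st : List (List Int) × Int) (k : Nat) :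
    stepB (r0::r1::r2::rest) st ((3*(k+1) : Nat) : Int) = stepB rest st ((3*k : Nat) : Int) := by
  unfold stepB innerB
  rw [show ((3*(k+1) : Nat) : Int) + 1 = ((3*k+1+3 : Nat) : Int) from by push_cast; ring,
      show ((3*(k+1) : Nat) : Int) + 2 = ((3*k+2+3 : Nat) : Int) from by push_cast; ring,
      show ((3*(k+1) : Nat) : Int) = ((3*k+3 : Nat) : Int) from by push_cast; ring,
      show ((3*k : Nat) : Int) + 1 = ((3*k+1 : Nat) : Int) from by push_cast; ring,
      show ((3*k : Nat) : Int) + 2 = ((3*k+2 : Nat) : Int) from by push_cast; ring]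
  simp only [PySem.List.pyGetD_natCast, getD3]

lemma fd3 (n : Nat) : PySem.Int.floordiv ((n : Nat) : Int) 3 = ((n/3 : Nat) : Int) := by
  exact_mod_cast PySem.Int.floordiv_natCast n 3
lemma md3 (n : Nat) : PySem.Int.mod ((n : Nat) : Int) 3 = ((n % 3 : Nat) : Int) := by
  exact_mod_cast PySem.Int.mod_natCast n 3

-- one complete 3-column block of B's scan (j = 3t, 3t+1, 3t+2)
lemma innerB_block (r0 r1 r2 : List Int) (z t : Nat)
    (zs : List (List Int)) (h0 : 3*t+3 ≤ r0.length) :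
    [((3*t : Nat) : Int), ((3*t+1 : Nat) : Int), ((3*t+2 : Nat) : Int)].foldl
        (innerB r0 r1 r2 ((z : Nat) : Int)) zs
      = appAt zs (z+t) ((r0.drop (3*t)).take 3 ++ ((r1.drop (3*t)).take 3 ++ (r2.drop (3*t)).take 3)) := by
  simp only [List.foldl_cons, List.foldl_nil]
  unfold innerB
  simp only [fd3, md3, PySem.List.pyGetD_natCast]
  rw [show (3*t/3 : Nat) = t from by omega, show ((3*t)%3 : Nat) = 0 from by omega,
      show ((3*t+1)/3 : Nat) = t from by omega, show ((3*t+1)%3 : Nat) = 1 from by omega,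
      show ((3*t+2)/3 : Nat) = t from by omega, show ((3*t+2)%3 : Nat) = 2 from by omega]
  rw [if_neg (show ¬((0:Nat):Int) = 2 from by decide)]
  rw [if_neg (show ¬((1:Nat):Int) = 2 from by decide)]
  rw [if_pos (show ((2:Nat):Int) = 2 from by decide)]
  rw [show ((z:Int) + ((t:Nat):Int)) = ((z+t : Nat) : Int) from by push_cast; ring]
  rw [show (((3*t+2 : Nat)):Int) - 2 = ((3*t : Nat) : Int) from by push_cast; ring,
      show (((3*t+2 : Nat)):Int) + 1 = ((3*t+3 : Nat) : Int) from by push_cast; ring]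
  simp only [PySem.List.pySetD_natCast, PySem.List.pyGetD_natCast, PySem.List.slice_natCast]
  rw [show (3*t+3 - 3*t : Nat) = 3 from by omega]
  show appAt (appAt (appAt (appAt (appAt zs (z+t) _) (z+t) _) (z+t) _) (z+t) _) (z+t) _ = _
  simp only [appAt_appAt]
  rw [take3_drop r0 (3*t) (by omega)]
  simp only [List.cons_append, List.nil_append]

-- B's scan over the complete blocks of the top row = blocksFrom
lemma innerB_blocks (r0 r1 r2 : List Int) (z : Nat) :
    ∀ (d t : Nat) (zs : List (List Int)), 3*(t+d) ≤ r0.length →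
    ((List.range' (3*t) (3*d)).map (fun n => ((n : Nat) : Int))).foldl
        (innerB r0 r1 r2 ((z : Nat) : Int)) zs
      = blocksFrom r0 r1 r2 z t d zs := by
  intro d
  induction d with
  | zero => intro t zs _; rfl
  | succ d ih =>
    intro t zs hlen
    rw [show 3*(d+1) = 3 + 3*d from by omega, ← List.range'_append (s := 3*t) (m := 3) (n := 3*d) (step := 1)]
    rw [List.map_append, List.foldl_append]
    rw [show (3*t + 1*3 : Nat) = 3*(t+1) from by omega]
    rw [show List.range' (3*t) 3 = [3*t, 3*t+1, 3*t+2] from by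
          simp [List.range'_succ]]
    rw [show (([3*t, 3*t+1, 3*t+2]).map (fun n => ((n : Nat) : Int)))
          = [((3*t : Nat) : Int), ((3*t+1 : Nat) : Int), ((3*t+2 : Nat) : Int)] from rfl]
    rw [innerB_block r0 r1 r2 z t zs (by omega)]
    rw [ih (t+1) _ (by omega)]
    rfl

-- B's scan over the trailing partial block of the top row
lemma innerB_tail (r0 r1 r2 : List Int) (z : Nat)
    (zs : List (List Int)) (hs : r0.length % 3 ≠ 0) :
    ((List.range' (3*(r0.length/3)) (r0.length % 3)).map (fun n => ((n : Nat) : Int))).foldl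
        (innerB r0 r1 r2 ((z : Nat) : Int)) zs
      = appAt zs (z + r0.length/3) (r0.drop (3*(r0.length/3))) := by
  have hstep : ∀ (u : Nat) (zs' : List (List Int)), u % 3 ≠ 2 →
      innerB r0 r1 r2 ((z : Nat) : Int) zs' ((u : Nat) : Int)
        = appAt zs' (z + u/3) [r0.getD u 0] := by
    intro u zs' hu
    unfold innerB
    simp only [fd3, md3, PySem.List.pyGetD_natCast]
    rw [if_neg (by exact_mod_cast fun h => hu (by exact_mod_cast h))]
    rw [show ((z:Int) + ((u/3 : Nat):Int)) = ((z + u/3 : Nat) : Int) from by push_cast; ring]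
    simp only [PySem.List.pySetD_natCast, PySem.List.pyGetD_natCast]
    rfl
  have hcase : r0.length % 3 = 1 ∨ r0.length % 3 = 2 := by omega
  rcases hcase with hv | hv
  · rw [hv]
    rw [show List.range' (3*(r0.length/3)) 1 = [3*(r0.length/3)] from by simp [List.range'_succ]]
    simp only [List.map_cons, List.map_nil, List.foldl_cons, List.foldl_nil]
    rw [hstep (3*(r0.length/3)) zs (by omega)]
    rw [show (3*(r0.length/3))/3 = r0.length/3 from by omega]
    rw [drop_part1 r0 (3*(r0.length/3)) (by omega)]
  · rw [hv]
    rw [show List.range' (3*(r0.length/3)) 2 = [3*(r0.length/3), 3*(r0.length/3)+1] from by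
          simp [List.range'_succ]]
    simp only [List.map_cons, List.map_nil, List.foldl_cons, List.foldl_nil]
    rw [hstep (3*(r0.length/3)) zs (by omega)]
    rw [hstep (3*(r0.length/3)+1) _ (by omega)]
    rw [show (3*(r0.length/3))/3 = r0.length/3 from by omega,
        show (3*(r0.length/3)+1)/3 = r0.length/3 from by omega]
    rw [appAt_appAt]
    rw [drop_part2 r0 (3*(r0.length/3)) (by omega)]
    rfl

lemma stepB_band (r0 r1 r2 : List Int) (rest : List (List Int)) (z : Nat)
    (zs : List (List Int)) :
    stepB (r0::r1::r2::rest) (zs, (z : Int)) ((3*0 : Nat) : Int)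
      = (bandApp z r0 r1 r2 zs, ((z + r0.length/3 : Nat) : Int)) := by
  unfold stepB
  rw [show ((3*0 : Nat) : Int) = ((0 : Nat) : Int) from by norm_num,
      show ((0 : Nat) : Int) + 1 = ((1 : Nat) : Int) from by norm_num,
      show ((0 : Nat) : Int) + 2 = ((2 : Nat) : Int) from by norm_num]
  simp only [PySem.List.pyGetD_natCast]
  rw [show (r0::r1::r2::rest).getD 0 ([] : List Int) = r0 from rfl,
      show (r0::r1::r2::rest).getD 1 ([] : List Int) = r1 from rfl,
      show (r0::r1::r2::rest).getD 2 ([] : List Int) = r2 from rfl]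
  rw [PySem.List.len_eq, PySem.List.pyRange_zero_nat]
  rw [show PySem.Int.floordiv ((r0.length : Nat) : Int) 3 = ((r0.length/3 : Nat) : Int) from by
        exact_mod_cast PySem.Int.floordiv_natCast r0.length 3]
  have hsplit : (List.range r0.length).map (fun k => ((k : Nat) : Int))
      = (List.range' 0 (3*(r0.length/3))).map (fun k => ((k : Nat) : Int))
        ++ (List.range' (3*(r0.length/3)) (r0.length % 3)).map (fun k => ((k : Nat) : Int)) := by
    rw [← List.map_append]
    congr 1
    rw [List.range_eq_range']
    conv_lhs => rw [show r0.length = 3*(r0.length/3) + r0.length % 3 from by omega]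
    rw [← List.range'_append (s := 0) (m := 3*(r0.length/3)) (n := r0.length % 3) (step := 1)]
    norm_num
  rw [hsplit, List.foldl_append]
  have hb := innerB_blocks r0 r1 r2 z (r0.length/3) 0 zs (by omega)
  rw [show (3*0 : Nat) = 0 from rfl] at hb
  rw [hb]
  by_cases hs : r0.length % 3 = 0
  · rw [hs]
    simp only [List.range'_zero, List.map_nil, List.foldl_nil]
    unfold bandApp
    rw [if_pos hs]
    simp only [Prod.mk.injEq]
    exact ⟨trivial, by push_cast; omega⟩
  · rw [innerB_tail r0 r1 r2 z _ hs]
    unfold bandApp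
    rw [if_neg hs]
    simp only [Prod.mk.injEq]
    exact ⟨trivial, by push_cast; omega⟩

lemma rangeBands (nb : Nat) :
    PySem.List.pyRange 0 ((3*nb : Nat) : Int) 3 = (List.range nb).map (fun k => ((3*k : Nat) : Int)) := by
  rw [PySem.List.pyRange_of_pos 0 _ (by norm_num)]
  rcases Nat.eq_zero_or_pos nb with h0 | hpos
  · subst h0; norm_num
  · rw [if_pos (by push_cast; omega)]
    rw [show (((3*nb : Nat) : Int)) - 0 + 3 - 1 = 3 * (nb : Int) + 2 from by push_cast; ring]
    rw [show (3 * (nb : Int) + 2) / 3 = (nb : Int) from by omega]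
    rw [Int.toNat_natCast]
    apply List.map_congr_left
    intro k _
    push_cast; ring

lemma foldBands : ∀ (nb : Nat) (m : List (List Int)), m.length = 3*nb →
    ∀ (z : Nat) (zs : List (List Int)),
    (List.range nb).foldl (fun st k => stepB m st ((3*k : Nat) : Int)) (zs, (z : Int))
      = (bandsB m z zs, ((z + qsum m : Nat) : Int)) := by
  intro nb
  induction nb with
  | zero =>
    intro m hm z zs
    have : m = [] := List.eq_nil_of_length_eq_zero (by omega)
    subst this
    show (zs, (z:Int)) = (zs, ((z + qsum [] : Nat) : Int))
    rw [show qsum [] = 0 from rfl, Nat.add_zero]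
  | succ nb ih =>
    intro m hm z zs
    rcases m with _|⟨r0,_|⟨r1,_|⟨r2,rest⟩⟩⟩
    · simp only [List.length_nil] at hm; omega
    · simp only [List.length_cons, List.length_nil] at hm; omega
    · simp only [List.length_cons, List.length_nil] at hm; omega
    · rw [List.range_succ_eq_map, List.foldl_cons, List.foldl_map]
      rw [stepB_band r0 r1 r2 rest z zs]
      have hfun : (fun (st : List (List Int) × Int) (k : Nat) =>
            stepB (r0::r1::r2::rest) st ((3*(Nat.succ k) : Nat) : Int))
          = (fun st k => stepB rest st ((3*k : Nat) : Int)) := by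
        funext st k
        exact stepB_shift r0 r1 r2 rest st k
      rw [hfun]
      rw [ih rest (by simp only [List.length_cons] at hm; omega) (z + r0.length/3) (bandApp z r0 r1 r2 zs)]
      rw [show bandsB rest (z + r0.length/3) (bandApp z r0 r1 r2 zs)
            = bandsB (r0::r1::r2::rest) z zs from rfl]
      rw [show (z + r0.length/3 + qsum rest : Nat) = (z + qsum (r0::r1::r2::rest) : Nat) from by
            rw [show qsum (r0::r1::r2::rest) = r0.length/3 + qsum rest from rfl]; omega]

lemma altEq (m : List (List Int)) (h : bandsOK 0 m = true) :
    get_zones_alt m = bandsB m 0 (List.replicate 9 []) := by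
  have hmod := bandsOK_mod m.length m le_rfl 0 h
  have hm : m.length = 3*(m.length/3) := by omega
  rw [alt_eq_stepB, PySem.List.len_eq]
  rw [show ((m.length : Nat) : Int) = ((3*(m.length/3) : Nat) : Int) from by exact_mod_cast congrArg (Nat.cast : Nat → Int) hm]
  rw [rangeBands (m.length/3), List.foldl_map]
  have hfb := foldBands (m.length/3) m hm 0 (List.replicate 9 [])
  simp only [Nat.cast_zero] at hfb
  rw [hfb]

lemma Aside (m : List (List Int)) (h : bandsOK 0 m = true) :
    get_zones m = bandsB m 0 (List.replicate 9 []) := by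
  unfold get_zones
  have hle : needFuel m ≤ (m.map List.length).sum := needFuel_le m.length m le_rfl 0 h
  have hsum : m.foldl (fun a r => a + r.length) 0 = (m.map List.length).sum := by
    simpa using PySem.List.foldl_add_nat m List.length 0
  rw [hsum]
  rw [show (m.map List.length).sum + 1 = needFuel m + ((m.map List.length).sum + 1 - needFuel m) from by omega]
  have hmain := mainAux m.length m le_rfl 0 (List.replicate 9 [])
      ((m.map List.length).sum + 1 - needFuel m) h
  simp only [Nat.cast_zero] at hmain
  exact hmain

lemma finalEq (m : List (List Int)) (h : bandsOK 0 m = true) :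
    get_zones m = get_zones_alt m := by rw [Aside m h, altEq m h]

-- ===== VERDICT (by name: the statement is the Claim_ definition above) =====
theorem get_zones_spec : Claim_equal_get_zones := by
  intro m _ hpre
  unfold Spec_get_zones
  exact finalEq m hpre
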